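-- pv_equiv track=rewrite | github.com/thilinicooray/DSA-Practice | graph/AM10_task_scheduling.py | get_dependent_count
-- ===== SOURCE A (Python) =====
-- def get_dependent_count(requirements):
--     dep = {}
--     dep_counts = {}
--
--     for task_order in requirements:
--         for i in range(len(task_order)):
--
--             if task_order[i] not in dep:
--                 dep[task_order[i]] = []
--
--             if task_order[i] not in dep_counts:
--                 dep_counts[task_order[i]] = 0
--
--
--             if i > 0:
--                 prev_task = task_order[i-1]
--                 cur_task = task_order[i]
--
--                 dep[prev_task].append(cur_task)
--                 dep_counts[cur_task] += 1
--
--     return dep_counts, dep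
-- ===== SOURCE B (Python) =====
-- def get_dependent_count(requirements):
--     # declarative formulation: key order = first occurrence over the flattened
--     # input; counts/adjacency are read off a precomputed global edge list.
--     tasks = list(dict.fromkeys(t for order in requirements for t in order))
--     edges = [(p, c) for order in requirements for p, c in zip(order, order[1:])]
--     dep_counts = {t: len([c for p, c in edges if c == t]) for t in tasks}
--     dep = {t: [c for p, c in edges if p == t] for t in tasks}
--     return dep_counts, dep
-- ===== Notes on version B (the rewrite author's own statement) =====
-- stated objective: alternative
-- what changed: A's single stateful pass that mutates two dicts with an index loop and an i>0 guard is replaced by a declarative formulation: compute the first-occurrence key order of the flattened input and a global edge list once, then build each dict by a comprehension that reads counts/adjacency straight off the edge list per key.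
import Mathlib
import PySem

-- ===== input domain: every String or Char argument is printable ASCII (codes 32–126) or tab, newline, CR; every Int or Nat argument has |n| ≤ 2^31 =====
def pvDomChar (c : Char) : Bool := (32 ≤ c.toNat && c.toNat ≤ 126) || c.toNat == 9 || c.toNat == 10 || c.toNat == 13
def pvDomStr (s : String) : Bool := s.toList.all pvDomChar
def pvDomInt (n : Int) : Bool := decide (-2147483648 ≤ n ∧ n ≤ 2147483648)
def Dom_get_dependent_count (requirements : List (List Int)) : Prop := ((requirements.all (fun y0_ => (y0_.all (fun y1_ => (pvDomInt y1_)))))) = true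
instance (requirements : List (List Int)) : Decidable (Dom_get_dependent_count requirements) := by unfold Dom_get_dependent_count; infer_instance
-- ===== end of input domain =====

-- B replaces A's single stateful pass (two dicts mutated under an index loop with an i>0 guard) by a
-- declarative formulation: first-occurrence key order plus a global edge list, from which each dict
-- is built by a per-key comprehension (objective: alternative; not faster).

-- ===== PORT A =====
-- State is (dep_counts, dep), in A's return order.
-- The two membership checks and conditional initialisations of A's loop body.
def pvInitA (s : PySem.Dict Int Int × PySem.Dict Int (List Int)) (t : Int) :
    PySem.Dict Int Int × PySem.Dict Int (List Int) :=
  let dep := if s.2.contains t then s.2 else s.2.insert t ([] : List Int)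
  let dc := if s.1.contains t then s.1 else s.1.insert t (0 : Int)
  (dc, dep)

-- A's loop 'for i in range(len(task_order))' reading task_order[i] and task_order[i-1] is ported as
-- the obvious structural recursion carrying the previous element as prev_task (exact: i>0 iff we are
-- past the head); the i>0 body does dep[prev].append(cur) and dep_counts[cur] += 1 (keys always
-- present here, so Dict.modify with a default is exact).
def pvRestA : List Int → Int →
    PySem.Dict Int Int × PySem.Dict Int (List Int) →
    PySem.Dict Int Int × PySem.Dict Int (List Int)
  | [], _, s => s
  | cur :: tl, prev, s =>
      let s1 := pvInitA s cur
      pvRestA tl cur (s1.1.modify cur 0 (· + 1), s1.2.modify prev [] (· ++ [cur]))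

def pvListA (s : PySem.Dict Int Int × PySem.Dict Int (List Int)) (task_order : List Int) :
    PySem.Dict Int Int × PySem.Dict Int (List Int) :=
  match task_order with
  | [] => s
  | h :: tl => pvRestA tl h (pvInitA s h)

def get_dependent_count (requirements : List (List Int)) :
    (List (Int × Int)) × (List (Int × List Int)) :=
  let s := requirements.foldl pvListA (PySem.Dict.empty, PySem.Dict.empty)
  (s.1.items, s.2.items)

-- ===== PORT B =====
-- tasks = list(dict.fromkeys(...)) is PySem.List.dedup of the flattened input;
-- edges = [(p, c) for order in requirements for p, c in zip(order, order[1:])];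
-- each dict is a comprehension over tasks reading the edge list (len([...]) / [...]).
def get_dependent_count_alt (requirements : List (List Int)) :
    (List (Int × Int)) × (List (Int × List Int)) :=
  let tasks := PySem.List.dedup (requirements.flatMap (fun order => order))
  let edges := requirements.flatMap (fun order => order.zip (order.drop 1))
  let dep_counts := tasks.map (fun t => (t, ((edges.filter (fun pc => pc.2 == t)).length : Int)))
  let dep := tasks.map (fun t => (t, (edges.filter (fun pc => pc.1 == t)).map (fun pc => pc.2)))
  (dep_counts, dep)

-- ===== PRECONDITION & SPEC =====
def Spec_get_dependent_count (requirements : List (List Int)) (out : (List (Int × Int)) × (List (Int × List Int))) : Prop := out = get_dependent_count_alt requirements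
instance (requirements : List (List Int)) (out : (List (Int × Int)) × (List (Int × List Int))) : Decidable (Spec_get_dependent_count requirements out) := by unfold Spec_get_dependent_count; infer_instance

-- ===== CLAIM (what is proved, stated in full; the proofs are below) =====
def Claim_equal_get_dependent_count : Prop := ∀ (requirements : List (List Int)), Dom_get_dependent_count requirements → Spec_get_dependent_count requirements (get_dependent_count requirements)

-- ===== LEMMAS AND PROOFS =====

-- Proof-side two-pass decomposition of A: register-all pass (pvInitB) then edge pass (pvEdgeB).
def pvInitB (s : PySem.Dict Int Int × PySem.Dict Int (List Int)) (t : Int) :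
    PySem.Dict Int Int × PySem.Dict Int (List Int) :=
  ((if s.1.contains t then s.1 else s.1.insert t (0 : Int)),
   (if s.2.contains t then s.2 else s.2.insert t ([] : List Int)))

def pvEdgeB (s : PySem.Dict Int Int × PySem.Dict Int (List Int)) (pc : Int × Int) :
    PySem.Dict Int Int × PySem.Dict Int (List Int) :=
  (s.1.modify pc.2 0 (· + 1), s.2.modify pc.1 [] (· ++ [pc.2]))

def pvInitList (s : PySem.Dict Int Int × PySem.Dict Int (List Int)) (l : List Int) :
    PySem.Dict Int Int × PySem.Dict Int (List Int) :=
  l.foldl pvInitB s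

def pvEdgeList (s : PySem.Dict Int Int × PySem.Dict Int (List Int)) (l : List Int) :
    PySem.Dict Int Int × PySem.Dict Int (List Int) :=
  (l.zip (l.drop 1)).foldl pvEdgeB s

theorem pvInitA_eq : pvInitA = pvInitB := rfl

theorem pvC1_init (s : PySem.Dict Int Int × PySem.Dict Int (List Int)) (t u : Int)
    (h : s.1.contains u = true) : (pvInitB s t).1.contains u = true := by
  unfold pvInitB; dsimp only; split_ifs <;> simp [PySem.Dict.contains_insert, h]

theorem pvC2_init (s : PySem.Dict Int Int × PySem.Dict Int (List Int)) (t u : Int)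
    (h : s.2.contains u = true) : (pvInitB s t).2.contains u = true := by
  unfold pvInitB; dsimp only; split_ifs <;> simp [PySem.Dict.contains_insert, h]

theorem pvC1_init_self (s : PySem.Dict Int Int × PySem.Dict Int (List Int)) (t : Int) :
    (pvInitB s t).1.contains t = true := by
  unfold pvInitB; dsimp only; split_ifs with h <;> simp_all [PySem.Dict.contains_insert_self]

theorem pvC2_init_self (s : PySem.Dict Int Int × PySem.Dict Int (List Int)) (t : Int) :
    (pvInitB s t).2.contains t = true := by
  unfold pvInitB; dsimp only; split_ifs with h <;> simp_all [PySem.Dict.contains_insert_self]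

theorem pvC1_edge (s : PySem.Dict Int Int × PySem.Dict Int (List Int)) (pc : Int × Int) (u : Int)
    (h : s.1.contains u = true) : (pvEdgeB s pc).1.contains u = true := by
  unfold pvEdgeB; dsimp only; simp [PySem.Dict.contains_modify, h]

theorem pvC2_edge (s : PySem.Dict Int Int × PySem.Dict Int (List Int)) (pc : Int × Int) (u : Int)
    (h : s.2.contains u = true) : (pvEdgeB s pc).2.contains u = true := by
  unfold pvEdgeB; dsimp only; simp [PySem.Dict.contains_modify, h]

theorem pvC1_initFold (xs : List Int) (s : PySem.Dict Int Int × PySem.Dict Int (List Int)) (u : Int)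
    (h : s.1.contains u = true) : (xs.foldl pvInitB s).1.contains u = true := by
  induction xs generalizing s with
  | nil => exact h
  | cons x xs ih => exact ih _ (pvC1_init s x u h)

theorem pvC2_initFold (xs : List Int) (s : PySem.Dict Int Int × PySem.Dict Int (List Int)) (u : Int)
    (h : s.2.contains u = true) : (xs.foldl pvInitB s).2.contains u = true := by
  induction xs generalizing s with
  | nil => exact h
  | cons x xs ih => exact ih _ (pvC2_init s x u h)

theorem pvC1_initFold_mem (xs : List Int) (s : PySem.Dict Int Int × PySem.Dict Int (List Int)) (u : Int)
    (hu : u ∈ xs) : (xs.foldl pvInitB s).1.contains u = true := by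
  induction xs generalizing s with
  | nil => cases hu
  | cons x xs ih =>
      rcases List.mem_cons.mp hu with rfl | hu'
      · exact pvC1_initFold xs _ u (pvC1_init_self s u)
      · exact ih _ hu'

theorem pvC2_initFold_mem (xs : List Int) (s : PySem.Dict Int Int × PySem.Dict Int (List Int)) (u : Int)
    (hu : u ∈ xs) : (xs.foldl pvInitB s).2.contains u = true := by
  induction xs generalizing s with
  | nil => cases hu
  | cons x xs ih =>
      rcases List.mem_cons.mp hu with rfl | hu'
      · exact pvC2_initFold xs _ u (pvC2_init_self s u)
      · exact ih _ hu'

theorem pvDictComm {ν : Type} (d : PySem.Dict Int ν) (k t : Int) (dflt v : ν) (f : ν → ν)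
    (hk : d.contains k = true) :
    (if (d.modify k dflt f).contains t then d.modify k dflt f else (d.modify k dflt f).insert t v)
      = (if d.contains t then d else d.insert t v).modify k dflt f := by
  by_cases ht : d.contains t = true
  · have hm : (d.modify k dflt f).contains t = true := by
      simp [PySem.Dict.contains_modify, ht]
    rw [if_pos hm, if_pos ht]
  · have htk : t ≠ k := by rintro rfl; rw [hk] at ht; exact ht rfl
    have hm : (d.modify k dflt f).contains t = false := by
      simp [PySem.Dict.contains_modify, ht, htk]
    rw [if_neg (by simp [hm]), if_neg (by simp [ht])]
    show (d.insert k (f (d.getD k dflt))).insert t v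
        = (d.insert t v).insert k (f ((d.insert t v).getD k dflt))
    rw [PySem.Dict.getD_insert_of_ne d v dflt (Ne.symm htk)]
    apply PySem.Dict.ext
    have htf : d.contains t = false := by simpa using ht
    have hins : (d.insert k (f (d.getD k dflt))).contains t = false := by
      simp [PySem.Dict.contains_insert, htf, htk]
    rw [PySem.Dict.items_insert_of_not_contains _ _ hins,
        PySem.Dict.items_insert_of_contains _ _ hk,
        PySem.Dict.items_insert_of_contains _ _ (by simp [PySem.Dict.contains_insert, hk]),
        PySem.Dict.items_insert_of_not_contains _ _ htf]
    simp [List.map_append, htk]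

theorem pvSwapOne (s : PySem.Dict Int Int × PySem.Dict Int (List Int)) (pc : Int × Int) (t : Int)
    (h1 : s.1.contains pc.2 = true) (h2 : s.2.contains pc.1 = true) :
    pvInitB (pvEdgeB s pc) t = pvEdgeB (pvInitB s t) pc := by
  unfold pvInitB pvEdgeB
  exact Prod.ext (pvDictComm s.1 pc.2 t 0 0 _ h1) (pvDictComm s.2 pc.1 t [] [] _ h2)

theorem pvSwapFoldInit (xs : List Int) (s : PySem.Dict Int Int × PySem.Dict Int (List Int)) (pc : Int × Int)
    (h1 : s.1.contains pc.2 = true) (h2 : s.2.contains pc.1 = true) :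
    xs.foldl pvInitB (pvEdgeB s pc) = pvEdgeB (xs.foldl pvInitB s) pc := by
  induction xs generalizing s with
  | nil => rfl
  | cons x xs ih =>
      calc (x :: xs).foldl pvInitB (pvEdgeB s pc)
          = xs.foldl pvInitB (pvInitB (pvEdgeB s pc) x) := rfl
        _ = xs.foldl pvInitB (pvEdgeB (pvInitB s x) pc) := by rw [pvSwapOne s pc x h1 h2]
        _ = pvEdgeB (xs.foldl pvInitB (pvInitB s x)) pc :=
            ih _ (pvC1_init s x _ h1) (pvC2_init s x _ h2)

theorem pvSwapPassInit (reqs : List (List Int)) (s : PySem.Dict Int Int × PySem.Dict Int (List Int)) (pc : Int × Int)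
    (h1 : s.1.contains pc.2 = true) (h2 : s.2.contains pc.1 = true) :
    reqs.foldl pvInitList (pvEdgeB s pc) = pvEdgeB (reqs.foldl pvInitList s) pc := by
  induction reqs generalizing s with
  | nil => rfl
  | cons l rest ih =>
      calc (l :: rest).foldl pvInitList (pvEdgeB s pc)
          = rest.foldl pvInitList (pvInitList (pvEdgeB s pc) l) := rfl
        _ = rest.foldl pvInitList (pvEdgeB (pvInitList s l) pc) := by
              unfold pvInitList; rw [pvSwapFoldInit l s pc h1 h2]
        _ = pvEdgeB (rest.foldl pvInitList (pvInitList s l)) pc :=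
            ih _ (pvC1_initFold l s _ h1) (pvC2_initFold l s _ h2)

theorem pvSwapPassEdges (ps : List (Int × Int)) (reqs : List (List Int))
    (s : PySem.Dict Int Int × PySem.Dict Int (List Int))
    (h : ∀ pc ∈ ps, s.1.contains pc.2 = true ∧ s.2.contains pc.1 = true) :
    reqs.foldl pvInitList (ps.foldl pvEdgeB s) = ps.foldl pvEdgeB (reqs.foldl pvInitList s) := by
  induction ps generalizing s with
  | nil => rfl
  | cons pc ps ih =>
      have hpc := h pc (List.mem_cons_self ..)
      have h' : ∀ q ∈ ps, (pvEdgeB s pc).1.contains q.2 = true ∧ (pvEdgeB s pc).2.contains q.1 = true := by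
        intro q hq
        have hqm := h q (List.mem_cons_of_mem _ hq)
        exact ⟨pvC1_edge s pc _ hqm.1, pvC2_edge s pc _ hqm.2⟩
      simp only [List.foldl_cons]
      rw [ih _ h', pvSwapPassInit reqs s pc hpc.1 hpc.2]

theorem pvRestA_eq (tl : List Int) (prev : Int) (s : PySem.Dict Int Int × PySem.Dict Int (List Int))
    (h1 : s.1.contains prev = true) (h2 : s.2.contains prev = true) :
    pvRestA tl prev s = ((prev :: tl).zip tl).foldl pvEdgeB (tl.foldl pvInitB s) := by
  induction tl generalizing prev s with
  | nil => rfl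
  | cons cur tl ih =>
      calc pvRestA (cur :: tl) prev s
          = pvRestA tl cur (pvEdgeB (pvInitB s cur) (prev, cur)) := by
            rw [show pvRestA (cur :: tl) prev s
                = pvRestA tl cur (pvEdgeB (pvInitA s cur) (prev, cur)) from rfl, pvInitA_eq]
        _ = ((cur :: tl).zip tl).foldl pvEdgeB (tl.foldl pvInitB (pvEdgeB (pvInitB s cur) (prev, cur))) :=
            ih cur _ (pvC1_edge _ _ _ (pvC1_init_self s cur)) (pvC2_edge _ _ _ (pvC2_init_self s cur))
        _ = ((cur :: tl).zip tl).foldl pvEdgeB (pvEdgeB (tl.foldl pvInitB (pvInitB s cur)) (prev, cur)) := by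
            rw [pvSwapFoldInit tl (pvInitB s cur) (prev, cur) (pvC1_init_self s cur) (pvC2_init s cur prev h2)]
        _ = ((prev :: cur :: tl).zip (cur :: tl)).foldl pvEdgeB ((cur :: tl).foldl pvInitB s) := rfl

theorem pvListA_eq (l : List Int) (s : PySem.Dict Int Int × PySem.Dict Int (List Int)) :
    pvListA s l = pvEdgeList (pvInitList s l) l := by
  cases l with
  | nil => rfl
  | cons h tl =>
      show pvRestA tl h (pvInitA s h) = _
      rw [pvInitA_eq, pvRestA_eq tl h (pvInitB s h) (pvC1_init_self s h) (pvC2_init_self s h)]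
      rfl

theorem pvGlobal (reqs : List (List Int)) (s : PySem.Dict Int Int × PySem.Dict Int (List Int)) :
    reqs.foldl pvListA s = reqs.foldl pvEdgeList (reqs.foldl pvInitList s) := by
  induction reqs generalizing s with
  | nil => rfl
  | cons l rest ih =>
      have hmem : ∀ pc ∈ l.zip (l.drop 1),
          (pvInitList s l).1.contains pc.2 = true ∧ (pvInitList s l).2.contains pc.1 = true := by
        intro pc hpc
        obtain ⟨a, b⟩ := pc
        obtain ⟨hfst, hsnd⟩ := List.of_mem_zip hpc
        exact ⟨pvC1_initFold_mem l s b (List.mem_of_mem_drop hsnd),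
               pvC2_initFold_mem l s a hfst⟩
      calc (l :: rest).foldl pvListA s
          = rest.foldl pvListA (pvListA s l) := rfl
        _ = rest.foldl pvEdgeList (rest.foldl pvInitList (pvListA s l)) := ih _
        _ = rest.foldl pvEdgeList (rest.foldl pvInitList (pvEdgeList (pvInitList s l) l)) := by
              rw [pvListA_eq]
        _ = rest.foldl pvEdgeList (pvEdgeList (rest.foldl pvInitList (pvInitList s l)) l) := by
              unfold pvEdgeList
              rw [pvSwapPassEdges (l.zip (l.drop 1)) rest (pvInitList s l) hmem]
        _ = (l :: rest).foldl pvEdgeList ((l :: rest).foldl pvInitList s) := rfl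

-- ===== characterizing the two passes declaratively =====

-- the product folds act componentwise
theorem pvInitFold_fst (xs : List Int) (s : PySem.Dict Int Int × PySem.Dict Int (List Int)) :
    (xs.foldl pvInitB s).1
      = xs.foldl (fun d t => if d.contains t then d else d.insert t (0 : Int)) s.1 := by
  induction xs generalizing s with
  | nil => rfl
  | cons x xs ih => simpa [pvInitB] using ih (pvInitB s x)

theorem pvInitFold_snd (xs : List Int) (s : PySem.Dict Int Int × PySem.Dict Int (List Int)) :
    (xs.foldl pvInitB s).2
      = xs.foldl (fun d t => if d.contains t then d else d.insert t ([] : List Int)) s.2 := by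
  induction xs generalizing s with
  | nil => rfl
  | cons x xs ih => simpa [pvInitB] using ih (pvInitB s x)

theorem pvEdgeFold_fst (ps : List (Int × Int)) (s : PySem.Dict Int Int × PySem.Dict Int (List Int)) :
    (ps.foldl pvEdgeB s).1
      = ps.foldl (fun d pc => d.modify pc.2 0 (· + 1)) s.1 := by
  induction ps generalizing s with
  | nil => rfl
  | cons p ps ih => simpa [pvEdgeB] using ih (pvEdgeB s p)

theorem pvEdgeFold_snd (ps : List (Int × Int)) (s : PySem.Dict Int Int × PySem.Dict Int (List Int)) :
    (ps.foldl pvEdgeB s).2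
      = ps.foldl (fun d pc => d.modify pc.1 [] (· ++ [pc.2])) s.2 := by
  induction ps generalizing s with
  | nil => rfl
  | cons p ps ih => simpa [pvEdgeB] using ih (pvEdgeB s p)

-- the register pass: keys and lookups
theorem pvKeysInit {ν : Type} (xs : List Int) (d : PySem.Dict Int ν) (v0 : ν) :
    (xs.foldl (fun d t => if d.contains t then d else d.insert t v0) d).keys
      = PySem.Set.update d.keys xs := by
  induction xs generalizing d with
  | nil => rfl
  | cons x xs ih =>
      rw [List.foldl_cons, PySem.Set.update_cons, ih]
      congr 1
      by_cases hx : d.contains x = true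
      · rw [if_pos hx]
        simp [PySem.Set.add, (PySem.Dict.contains_iff_mem_keys d x).mp hx]
      · rw [if_neg hx, PySem.Dict.keys_insert_of_not_contains _ _ (by simpa using hx)]
        have hm : x ∉ d.keys := fun hm => hx ((PySem.Dict.contains_iff_mem_keys d x).mpr hm)
        simp [PySem.Set.add, hm]

theorem pvGetInit {ν : Type} (xs : List Int) (d : PySem.Dict Int ν) (v0 : ν) (k : Int) :
    (xs.foldl (fun d t => if d.contains t then d else d.insert t v0) d).get? k
      = if d.contains k then d.get? k else (if k ∈ xs then some v0 else none) := by
  induction xs generalizing d with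
  | nil => simp [PySem.Dict.get?_eq_none_iff_contains]
  | cons x xs ih =>
      rw [List.foldl_cons, ih]
      by_cases hx : d.contains x = true
      · rw [if_pos hx]
        by_cases hk : d.contains k = true
        · simp [hk]
        · by_cases hkx : k = x
          · exact absurd (hkx ▸ hx) hk
          · simp [hkx, hk]
      · rw [if_neg hx]
        by_cases hkx : k = x
        · subst hkx
          have h1 : (d.insert k v0).contains k = true := PySem.Dict.contains_insert_self d k v0
          simp [h1, PySem.Dict.get?_insert_self, hx]
        · have hc : (d.insert x v0).contains k = d.contains k := by
            simp [PySem.Dict.contains_insert, hkx]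
          rw [hc, PySem.Dict.get?_insert_of_ne _ _ hkx]
          simp [hkx]

theorem pvSetUpdate_of_subset (s : PySem.Set Int) (xs : List Int) (h : ∀ x ∈ xs, x ∈ s) :
    PySem.Set.update s xs = s := by
  induction xs generalizing s with
  | nil => rfl
  | cons x xs ih =>
      rw [PySem.Set.update_cons]
      have hx : PySem.Set.add s x = s := by
        simp [PySem.Set.add, h x (List.mem_cons_self ..)]
      rw [hx]
      exact ih s (fun y hy => h y (List.mem_cons_of_mem _ hy))

-- lookups in the freshly registered dicts are the default everywhere
theorem pvGetDInit {ν : Type} (v0 : ν) (F : List Int) (t : Int) :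
    (F.foldl (fun d t => if d.contains t then d else d.insert t v0)
        (PySem.Dict.empty : PySem.Dict Int ν)).getD t v0 = v0 := by
  rw [PySem.Dict.getD_eq_get?_getD, pvGetInit]
  simp only [PySem.Dict.contains_empty, Bool.false_eq_true, if_false]
  split_ifs <;> rfl

-- every edge endpoint occurs in the flattened input
theorem pvEdgeFst_mem (req : List (List Int)) (pc : Int × Int)
    (h : pc ∈ req.flatMap (fun o => o.zip (o.drop 1))) :
    pc.1 ∈ req.flatMap (fun o => o) := by
  obtain ⟨o, ho, hpc⟩ := List.mem_flatMap.mp h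
  exact List.mem_flatMap.mpr ⟨o, ho, (List.of_mem_zip hpc).1⟩

theorem pvEdgeSnd_mem (req : List (List Int)) (pc : Int × Int)
    (h : pc ∈ req.flatMap (fun o => o.zip (o.drop 1))) :
    pc.2 ∈ req.flatMap (fun o => o) := by
  obtain ⟨o, ho, hpc⟩ := List.mem_flatMap.mp h
  exact List.mem_flatMap.mpr ⟨o, ho, List.mem_of_mem_drop (List.of_mem_zip hpc).2⟩

-- ===== VERDICT (by name: the statement is the Claim_ definition above) =====
theorem get_dependent_count_spec : Claim_equal_get_dependent_count := by
  intro req _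
  unfold Spec_get_dependent_count get_dependent_count get_dependent_count_alt
  have h1 : req.foldl pvInitList (PySem.Dict.empty, PySem.Dict.empty)
      = (req.flatMap (fun o => o)).foldl pvInitB (PySem.Dict.empty, PySem.Dict.empty) := by
    rw [List.foldl_flatMap]; rfl
  have h2 : ∀ s, req.foldl pvEdgeList s
      = (req.flatMap (fun o => o.zip (o.drop 1))).foldl pvEdgeB s := by
    intro s; rw [List.foldl_flatMap]; rfl
  rw [pvGlobal, h2, h1]
  set F := req.flatMap (fun o => o) with hF
  set E := req.flatMap (fun o => o.zip (o.drop 1)) with hE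
  -- component views of the two passes
  have hsf : (F.foldl pvInitB ((PySem.Dict.empty, PySem.Dict.empty) :
      PySem.Dict Int Int × PySem.Dict Int (List Int))).1
      = F.foldl (fun d t => if d.contains t then d else d.insert t (0 : Int)) PySem.Dict.empty :=
    pvInitFold_fst F _
  have hss : (F.foldl pvInitB ((PySem.Dict.empty, PySem.Dict.empty) :
      PySem.Dict Int Int × PySem.Dict Int (List Int))).2
      = F.foldl (fun d t => if d.contains t then d else d.insert t ([] : List Int)) PySem.Dict.empty :=
    pvInitFold_snd F _
  set D1c := F.foldl (fun d t => if d.contains t then d else d.insert t (0 : Int))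
      (PySem.Dict.empty : PySem.Dict Int Int) with hD1c
  set D1a := F.foldl (fun d t => if d.contains t then d else d.insert t ([] : List Int))
      (PySem.Dict.empty : PySem.Dict Int (List Int)) with hD1a
  have hkc : D1c.keys = PySem.Set.ofList F := by rw [hD1c, pvKeysInit]; rfl
  have hka : D1a.keys = PySem.Set.ofList F := by rw [hD1a, pvKeysInit]; rfl
  have hndc : D1c.keys.Nodup := by rw [hkc]; exact PySem.Set.nodup_ofList F
  have hnda : D1a.keys.Nodup := by rw [hka]; exact PySem.Set.nodup_ofList F
  -- second pass, first component (counts)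
  have hfold1 : (E.foldl pvEdgeB (F.foldl pvInitB (PySem.Dict.empty, PySem.Dict.empty))).1
      = E.foldl (fun d pc => d.modify pc.2 0 (· + 1)) D1c := by
    rw [pvEdgeFold_fst, hsf]
  have hfold2 : (E.foldl pvEdgeB (F.foldl pvInitB (PySem.Dict.empty, PySem.Dict.empty))).2
      = E.foldl (fun d pc => d.modify pc.1 [] (· ++ [pc.2])) D1a := by
    rw [pvEdgeFold_snd, hss]
  have hk2c : (E.foldl (fun d pc => d.modify pc.2 0 (· + 1)) D1c).keys = PySem.Set.ofList F := by
    have h := PySem.Dict.keys_foldl_modify_key E (fun pc => pc.2) (0 : Int)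
      (fun _ _ v => v + 1) D1c
    rw [h, hkc]
    exact pvSetUpdate_of_subset _ _ (by
      intro x hx
      obtain ⟨pc, hpc, rfl⟩ := List.mem_map.mp hx
      exact (PySem.Set.mem_ofList F _).mpr (pvEdgeSnd_mem req pc hpc))
  have hk2a : (E.foldl (fun d pc => d.modify pc.1 [] (· ++ [pc.2])) D1a).keys
      = PySem.Set.ofList F := by
    have h := PySem.Dict.keys_foldl_modify_key E (fun pc => pc.1) ([] : List Int)
      (fun _ pc v => v ++ [pc.2]) D1a
    rw [h, hka]
    exact pvSetUpdate_of_subset _ _ (by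
      intro x hx
      obtain ⟨pc, hpc, rfl⟩ := List.mem_map.mp hx
      exact (PySem.Set.mem_ofList F _).mpr (pvEdgeFst_mem req pc hpc))
  have hnd2c : (E.foldl (fun d pc => d.modify pc.2 0 (· + 1)) D1c).keys.Nodup :=
    PySem.Dict.nodup_keys_foldl_modify_key E (fun pc => pc.2) (0 : Int) (fun _ _ v => v + 1) D1c hndc
  have hnd2a : (E.foldl (fun d pc => d.modify pc.1 [] (· ++ [pc.2])) D1a).keys.Nodup :=
    PySem.Dict.nodup_keys_foldl_modify_key E (fun pc => pc.1) ([] : List Int)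
      (fun _ pc v => v ++ [pc.2]) D1a hnda
  have hgc : ∀ t, (E.foldl (fun d pc => d.modify pc.2 0 (· + 1)) D1c).getD t 0
      = ((E.filter (fun pc => pc.2 == t)).length : Int) := by
    intro t
    have hm : E.foldl (fun d pc => d.modify pc.2 0 (· + 1)) D1c
        = (E.map (fun pc => pc.2)).foldl (fun d x => d.modify x 0 (· + 1)) D1c :=
      (List.foldl_map (f := fun pc : Int × Int => pc.2)
        (g := fun d x => d.modify x 0 (· + 1)) (l := E) (init := D1c)).symm
    rw [hm, PySem.Dict.getD_foldl_modify_add_one, hD1c, pvGetDInit]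
    rw [List.count_eq_countP, List.countP_map, List.countP_eq_length_filter]
    simp [Function.comp_def]
  have hga : ∀ t, (E.foldl (fun d pc => d.modify pc.1 [] (· ++ [pc.2])) D1a).getD t []
      = (E.filter (fun pc => pc.1 == t)).map (fun pc => pc.2) := by
    intro t
    rw [PySem.Dict.getD_foldl_modify_append, hD1a, pvGetDInit]
    simp
  show ((E.foldl pvEdgeB (F.foldl pvInitB (PySem.Dict.empty, PySem.Dict.empty))).1.items,
        (E.foldl pvEdgeB (F.foldl pvInitB (PySem.Dict.empty, PySem.Dict.empty))).2.items)
      = ((PySem.List.dedup F).map (fun t => (t, ((E.filter (fun pc => pc.2 == t)).length : Int))),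
         (PySem.List.dedup F).map (fun t => (t, (E.filter (fun pc => pc.1 == t)).map (fun pc => pc.2))))
  refine Prod.ext ?_ ?_
  · rw [hfold1, PySem.Dict.items_eq_map_keys _ hnd2c 0, hk2c, PySem.List.dedup_eq_ofList]
    exact List.map_congr_left (fun t _ => by rw [hgc t])
  · rw [hfold2, PySem.Dict.items_eq_map_keys _ hnd2a [], hk2a, PySem.List.dedup_eq_ofList]
    exact List.map_congr_left (fun t _ => by rw [hga t])
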